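-- pv_equiv track=rewrite | github.com/ericmerle3789/Collatz-Junction-Theorem | scripts/tools/session10f22_artin_investigation.py | kummer_carries
-- ===== SOURCE A (Python) =====
-- def kummer_carries(a, b, base=2):
--     """Nombre de retenues dans l'addition a + b en base `base`.
--     Par le theoreme de Kummer, c'est v_base(binom(a+b, a))."""
--     carries = 0
--     carry = 0
--     while a > 0 or b > 0 or carry > 0:
--         digit_sum = (a % base) + (b % base) + carry
--         carry = digit_sum // base
--         carries += carry  # actually carry is 0 or 1 in base 2
--         a //= base
--         b //= base
--         # In base 2, carry is always 0 or 1, and each carry contributes 1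
--     return carries
-- ===== SOURCE B (Python) =====
-- def kummer_carries(a, b, base=2):
--     """Nombre de retenues dans l'addition a + b en base `base`,
--     via l'identite de Legendre sur les sommes de chiffres:
--     chaque retenue retire exactement (base-1) de la somme des chiffres."""
--     def digit_sum(n):
--         s = 0
--         while n > 0:
--             s += n % base
--             n //= base
--         return s
--     return (digit_sum(a) + digit_sum(b) - digit_sum(a + b)) // (base - 1)
-- ===== Notes on version B (the rewrite author's own statement) =====
-- stated objective: alternative
-- what changed: Replaces A's single interleaved carry-propagation loop with three independent digit-sum loops and the closed-form Legendre identity carries = (S(a)+S(b)-S(a+b))//(base-1).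
-- outside the precondition, e.g. on kummer_carries(5, 3, -2): A returns 2, B returns 0; on kummer_carries(-1, 0, 1): A returns 0, B raises ZeroDivisionError; on kummer_carries(-2, 1, 2): A returns 0, B returns 1
import Mathlib
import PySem

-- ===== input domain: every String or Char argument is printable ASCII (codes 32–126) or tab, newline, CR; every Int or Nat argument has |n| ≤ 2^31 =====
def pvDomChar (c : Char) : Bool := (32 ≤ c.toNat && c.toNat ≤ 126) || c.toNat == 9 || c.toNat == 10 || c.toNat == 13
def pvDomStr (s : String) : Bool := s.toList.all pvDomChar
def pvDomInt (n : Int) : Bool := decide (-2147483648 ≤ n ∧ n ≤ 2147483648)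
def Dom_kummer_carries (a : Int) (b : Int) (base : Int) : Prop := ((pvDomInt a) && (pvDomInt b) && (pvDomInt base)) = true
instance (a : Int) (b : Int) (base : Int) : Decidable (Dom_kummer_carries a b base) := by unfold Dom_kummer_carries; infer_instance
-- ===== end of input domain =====

-- B replaces A's single interleaved carry-propagation loop with three independent digit-sum
-- loops and the Legendre identity carries = (S(a)+S(b)-S(a+b)) // (base-1) (alternative, same cost).


-- ===== PORT A =====
-- A's while-loop, ported with a fuel argument that merely makes it total; under
-- Pre_ the fuel a.toNat + b.toNat + 2 is provably sufficient (the loop body is A's, step for step).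
def kcLoop (base : Int) : Nat → Int → Int → Int → Int → Int
  | 0, _, _, _, carries => carries
  | f + 1, a, b, carry, carries =>
    if a > 0 ∨ b > 0 ∨ carry > 0 then
      kcLoop base f (PySem.Int.floordiv a base) (PySem.Int.floordiv b base)
        (PySem.Int.floordiv (PySem.Int.mod a base + PySem.Int.mod b base + carry) base)
        (carries + PySem.Int.floordiv (PySem.Int.mod a base + PySem.Int.mod b base + carry) base)
    else carries

def kummer_carries (a : Int) (b : Int) (base : Int) : Int :=
  kcLoop base (a.toNat + b.toNat + 2) a b 0 0

-- ===== PORT B =====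
-- B's digit-sum while-loop, same fuel device (n.toNat steps suffice since n strictly decreases).
def dsLoop (base : Int) : Nat → Int → Int → Int
  | 0, _, s => s
  | f + 1, n, s =>
    if n > 0 then dsLoop base f (PySem.Int.floordiv n base) (s + PySem.Int.mod n base)
    else s

def kummer_carries_alt (a : Int) (b : Int) (base : Int) : Int :=
  PySem.Int.floordiv (dsLoop base a.toNat a 0 + dsLoop base b.toNat b 0 - dsLoop base (a + b).toNat (a + b) 0) (base - 1)

-- ===== PRECONDITION & SPEC =====
-- Pre_ admits the function's natural domain (a,b ≥ 0, base ≥ 2) plus the both-nonpositive corner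
-- where A's loop never runs and both programs return 0.  It excludes: base 0 or 1 (A raises
-- ZeroDivisionError resp. diverges whenever the loop runs, and at base = 1 with a,b ≤ 0 B raises
-- where A returns 0), mixed-sign a,b (A usually diverges), and negative bases with a positive
-- argument, where A's returned carry count is an accidental artefact of a loop guard meant for
-- positive operands (it stops mid-expansion once the quotients turn negative) — a corner no one
-- would specify.
def Pre_kummer_carries (a : Int) (b : Int) (base : Int) : Prop :=
  (0 ≤ a ∧ 0 ≤ b ∧ 2 ≤ base) ∨ (a ≤ 0 ∧ b ≤ 0 ∧ base ≠ 1)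
instance (a : Int) (b : Int) (base : Int) : Decidable (Pre_kummer_carries a b base) := by
  unfold Pre_kummer_carries; infer_instance

def pvWitness_kummer_carries : Int × Int × Int := (7, 9, 2)

def Spec_kummer_carries (a : Int) (b : Int) (base : Int) (out : Int) : Prop := out = kummer_carries_alt a b base
instance (a : Int) (b : Int) (base : Int) (out : Int) : Decidable (Spec_kummer_carries a b base out) := by unfold Spec_kummer_carries; infer_instance

-- ===== CLAIM (what is proved, stated in full; the proofs are below) =====
def Claim_equal_kummer_carries : Prop := ∀ (a : Int) (b : Int) (base : Int), Dom_kummer_carries a b base → Pre_kummer_carries a b base → Spec_kummer_carries a b base (kummer_carries a b base)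

-- ===== LEMMAS AND PROOFS =====

-- n / base < n for positive n (Euclidean division, base ≥ 2)
theorem pv_ediv_lt {base n : Int} (hb : 2 ≤ base) (hn : 0 < n) : n / base < n := by
  have hq0 : 0 ≤ n / base := Int.ediv_nonneg hn.le (by omega)
  have h := Int.ediv_add_emod n base
  have h1 := Int.emod_nonneg n (by omega : base ≠ 0)
  have h2 := Int.emod_lt_of_pos n (by omega : (0:Int) < base)
  rcases eq_or_lt_of_le hq0 with hq | hq
  · omega
  · have h3 : 2 * (n / base) ≤ base * (n / base) :=
      mul_le_mul_of_nonneg_right (by omega) hq0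
    linarith

-- the carry digit is 0 or 1
theorem pv_ediv_le_one {base d : Int} (hb : 2 ≤ base) (h0 : 0 ≤ d) (h2 : d < 2 * base) :
    d / base ≤ 1 := by
  by_contra hgt
  have hq2 : 2 ≤ d / base := by omega
  have h3 : base * 2 ≤ base * (d / base) := mul_le_mul_of_nonneg_left hq2 (by omega)
  have h := Int.ediv_add_emod d base
  have h1 := Int.emod_nonneg d (by omega : base ≠ 0)
  linarith

-- digit sum of n.toNat in base base.toNat, as an Int
def digSum (base n : Int) : Int := ((Nat.digits base.toNat n.toNat).sum : Int)

theorem digSum_nonpos {base n : Int} (h : n ≤ 0) : digSum base n = 0 := by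
  unfold digSum
  rw [Int.toNat_of_nonpos h]
  simp

theorem digSum_step {base n : Int} (hb : 2 ≤ base) (hn : 0 ≤ n) :
    digSum base n = n % base + digSum base (n / base) := by
  rcases (by omega : n ≤ 0 ∨ 0 < n) with hle | hpos
  · have hn0 : n = 0 := le_antisymm hle hn
    subst hn0
    simp [digSum_nonpos]
  · obtain ⟨m, rfl⟩ : ∃ m : Nat, n = (m : Int) := ⟨n.toNat, (Int.toNat_of_nonneg hn).symm⟩
    obtain ⟨k, rfl⟩ : ∃ k : Nat, base = (k : Int) := ⟨base.toNat, (Int.toNat_of_nonneg (by omega)).symm⟩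
    have hm : 0 < m := by exact_mod_cast hpos
    have hk : 1 < k := by exact_mod_cast hb
    have hdiv : ((m : Int) / (k : Int)) = ((m / k : Nat) : Int) := by
      rw [Int.natCast_div]
    have hmod : ((m : Int) % (k : Int)) = ((m % k : Nat) : Int) := by
      rw [Int.natCast_mod]
    unfold digSum
    rw [hdiv, hmod]
    simp only [Int.toNat_natCast]
    rw [Nat.digits_def' hk hm]
    push_cast [List.sum_cons]
    ring

-- B's loop computes s + digSum, given fuel ≥ n.toNat
theorem dsLoop_eq (base : Int) (hb : 2 ≤ base) :
    ∀ (f : Nat) (n s : Int), n.toNat ≤ f → dsLoop base f n s = s + digSum base n := by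
  intro f
  induction f with
  | zero =>
    intro n s hf
    have : n ≤ 0 := by omega
    rw [dsLoop, digSum_nonpos this]; ring
  | succ f ih =>
    intro n s hf
    rw [dsLoop]
    split_ifs with h
    · have hfa : PySem.Int.floordiv n base = n / base := PySem.Int.floordiv_eq_ediv_of_pos (by omega)
      have hma : PySem.Int.mod n base = n % base := PySem.Int.mod_eq_emod_of_pos (by omega)
      have hlt : n / base < n := pv_ediv_lt hb h
      have h0 : 0 ≤ n / base := Int.ediv_nonneg (by omega) (by omega)
      have hfd : (n / base).toNat ≤ f := by omega
      rw [hfa, hma, ih _ _ hfd, digSum_step hb (le_of_lt h)]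
      ring
    · rw [digSum_nonpos (by omega)]; ring

-- A's accumulator is additive
theorem kcLoop_acc (base : Int) :
    ∀ (f : Nat) (a b carry c : Int), kcLoop base f a b carry c = c + kcLoop base f a b carry 0 := by
  intro f
  induction f with
  | zero => intro a b carry c; simp [kcLoop]
  | succ f ih =>
    intro a b carry c
    rw [kcLoop, kcLoop]
    split_ifs with h
    · rw [ih _ _ _ (c + _), ih _ _ _ (0 + _)]
      ring
    · ring

-- the loop on the all-zero state returns its accumulator
theorem kcLoop_zero (base : Int) :
    ∀ (f : Nat) (c : Int), kcLoop base f 0 0 0 c = c := by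
  intro f c
  cases f with
  | zero => rfl
  | succ f => rw [kcLoop, if_neg (by omega)]

-- Main invariant: A's loop counts exactly the digit-sum deficit / (base-1)
theorem kcLoop_main (base : Int) (hb : 2 ≤ base) :
    ∀ (f : Nat) (a b carry : Int), 0 ≤ a → 0 ≤ b → 0 ≤ carry → carry ≤ 1 →
      a.toNat + b.toNat + 1 ≤ f →
      (base - 1) * kcLoop base f a b carry 0 =
        digSum base a + digSum base b + carry - digSum base (a + b + carry) := by
  intro f
  induction f with
  | zero => intro a b carry _ _ _ _ hf; omega
  | succ f ih =>
    intro a b carry ha hb' hc0 hc1 hf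
    rw [kcLoop]
    split_ifs with hcond
    · have hbpos : (0:Int) < base := by omega
      simp only [PySem.Int.floordiv_eq_ediv_of_pos hbpos, PySem.Int.mod_eq_emod_of_pos hbpos]
      have hra := Int.emod_nonneg a (by omega : base ≠ 0)
      have hra' := Int.emod_lt_of_pos a hbpos
      have hrb := Int.emod_nonneg b (by omega : base ≠ 0)
      have hrb' := Int.emod_lt_of_pos b hbpos
      rcases (by omega : (0 < a ∨ 0 < b) ∨ (a = 0 ∧ b = 0 ∧ carry = 1)) with hab | ⟨ha0, hb0, hc⟩
      · have hda : 0 ≤ a / base := Int.ediv_nonneg ha (by omega)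
        have hdb : 0 ≤ b / base := Int.ediv_nonneg hb' (by omega)
        have hd0 : 0 ≤ a % base + b % base + carry := by omega
        have hdlt : a % base + b % base + carry < 2 * base := by omega
        have hc'0 : 0 ≤ (a % base + b % base + carry) / base := Int.ediv_nonneg hd0 (by omega)
        have hc'1 : (a % base + b % base + carry) / base ≤ 1 := pv_ediv_le_one hb hd0 hdlt
        have hfuel : (a / base).toNat + (b / base).toNat + 1 ≤ f := by
          rcases hab with hpa | hpb
          · have h1 : a / base < a := pv_ediv_lt hb hpa
            have h2 : b / base ≤ b := by
              rcases (by omega : 0 < b ∨ b = 0) with hpb2 | hb2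
              · exact le_of_lt (pv_ediv_lt hb hpb2)
              · subst hb2; simp
            omega
          · have h1 : b / base < b := pv_ediv_lt hb hpb
            have h2 : a / base ≤ a := by
              rcases (by omega : 0 < a ∨ a = 0) with hpa2 | ha2
              · exact le_of_lt (pv_ediv_lt hb hpa2)
              · subst ha2; simp
            omega
        rw [kcLoop_acc base f]
        have IH := ih (a / base) (b / base) ((a % base + b % base + carry) / base)
          hda hdb hc'0 hc'1 hfuel
        have hDa := digSum_step hb ha
        have hDb := digSum_step hb hb'
        have eq1 := Int.ediv_add_emod a base
        have eq2 := Int.ediv_add_emod b base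
        have eq3 := Int.ediv_add_emod (a % base + b % base + carry) base
        have hrs := Int.emod_nonneg (a % base + b % base + carry) (by omega : base ≠ 0)
        have hrs' := Int.emod_lt_of_pos (a % base + b % base + carry) hbpos
        have hs : a + b + carry =
            ((a % base + b % base + carry) % base) +
              (a / base + b / base + (a % base + b % base + carry) / base) * base := by
          linear_combination -eq1 - eq2 - eq3
        have hq : (a + b + carry) / base =
            a / base + b / base + (a % base + b % base + carry) / base := by
          rw [hs, Int.add_mul_ediv_right _ _ (by omega : base ≠ 0),
              Int.ediv_eq_zero_of_lt hrs hrs']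
          ring
        have hr : (a + b + carry) % base = (a % base + b % base + carry) % base := by
          rw [hs, Int.add_mul_emod_self_right, Int.emod_eq_of_lt hrs hrs']
        have hDs := digSum_step hb (by omega : (0:Int) ≤ a + b + carry)
        rw [hq, hr] at hDs
        linear_combination IH - hDa - hDb + hDs + eq3
      · -- a = b = 0, carry = 1: one more iteration with carry' = 0, then the loop is done
        subst ha0; subst hb0; subst hc
        have h00 : (0:Int) % base = 0 := Int.zero_emod base
        have h01 : (0:Int) / base = 0 := Int.zero_ediv base
        have h1m : (1:Int) % base = 1 := Int.emod_eq_of_lt (by omega) (by omega)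
        have h1d : (1:Int) / base = 0 := Int.ediv_eq_zero_of_lt (by omega) (by omega)
        rw [h00, h01]
        rw [show (0:Int) + 0 + 1 = 1 by ring, h1d, kcLoop_zero]
        have hds1 : digSum base 1 = 1 := by
          rw [digSum_step hb (by omega), h1m, h1d, digSum_nonpos le_rfl]
          ring
        rw [digSum_nonpos le_rfl, show (0:Int) + 0 + 1 = 1 by ring, hds1]
        ring
    · push_neg at hcond
      have ha0 : a = 0 := by omega
      have hb0 : b = 0 := by omega
      have hc : carry = 0 := by omega
      subst ha0; subst hb0; subst hc
      rw [digSum_nonpos le_rfl]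
      norm_num [digSum_nonpos]

-- ===== VERDICT (by name: the statement is the Claim_ definition above) =====
theorem kummer_carries_spec : Claim_equal_kummer_carries := by
  intro a b base _ hpre
  unfold Spec_kummer_carries kummer_carries kummer_carries_alt
  rcases hpre with ⟨ha, hb', hbase⟩ | ⟨ha, hb', hbase⟩
  · -- main case: nonnegative inputs, base ≥ 2
    rw [dsLoop_eq base hbase _ _ _ le_rfl, dsLoop_eq base hbase _ _ _ le_rfl,
        dsLoop_eq base hbase _ _ _ le_rfl]
    have hmain := kcLoop_main base hbase (a.toNat + b.toNat + 2) a b 0 ha hb' le_rfl (by omega) (by omega)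
    simp only [add_zero] at hmain
    rw [PySem.Int.floordiv_eq_ediv_of_pos (by omega : (0:Int) < base - 1)]
    rw [show (0:Int) + digSum base a + (0 + digSum base b) - (0 + digSum base (a + b)) =
        (base - 1) * kcLoop base (a.toNat + b.toNat + 2) a b 0 0 by linear_combination -hmain,
        Int.mul_ediv_cancel_left _ (by omega : (base:Int) - 1 ≠ 0)]
  · -- both-nonpositive corner: the loop never runs, all digit sums are 0
    have hta : a.toNat = 0 := Int.toNat_of_nonpos ha
    have htb : b.toNat = 0 := Int.toNat_of_nonpos hb'
    have htab : (a + b).toNat = 0 := Int.toNat_of_nonpos (by omega)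
    rw [hta, htb, htab]
    rw [show (0:Nat) + 0 + 2 = 2 by rfl]
    rw [show (2:Nat) = 1 + 1 by rfl, kcLoop, if_neg (by omega)]
    rw [dsLoop, dsLoop, dsLoop]
    norm_num [PySem.Int.floordiv]
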